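-- pv_equiv track=rewrite | github.com/fbghkdrb/baekjoon_python | 백준/Bronze/2587. 대표값2/대표값2.py | middle_num
-- ===== SOURCE A (Python) =====
-- def middle_num(li) :
--     for i in range(5) :
--         for j in range(4 - i) :
--             if li[j] > li[j+1] :
--                 temp = li[j]
--                 li[j] = li[j+1]
--                 li[j+1] = temp
--
--     return li[2]
-- ===== SOURCE B (Python) =====
-- def middle_num(li):
--     return sorted(li[:5])[2]
-- ===== Notes on version B (the rewrite author's own statement) =====
-- stated objective: simpler
-- what changed: Replaces the hand-written in-place bubble sort of the first five elements by a single sorted() call on a copied slice and indexes the median directly; B does not mutate the argument (the equivalence claimed is about the return value only).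
import Mathlib
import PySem

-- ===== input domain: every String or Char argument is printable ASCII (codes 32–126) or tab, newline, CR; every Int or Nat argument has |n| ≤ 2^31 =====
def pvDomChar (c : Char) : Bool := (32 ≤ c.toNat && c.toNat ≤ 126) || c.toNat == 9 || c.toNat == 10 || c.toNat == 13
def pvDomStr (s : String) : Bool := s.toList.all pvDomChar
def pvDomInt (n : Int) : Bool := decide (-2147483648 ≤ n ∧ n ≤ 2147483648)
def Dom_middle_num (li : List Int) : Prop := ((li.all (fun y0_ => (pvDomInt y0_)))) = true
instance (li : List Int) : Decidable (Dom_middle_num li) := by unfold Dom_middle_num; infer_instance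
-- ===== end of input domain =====

-- B replaces A's in-place bubble sort of the first five entries by sorted(li[:5])[2] (simpler);
-- A mutates li in place, B does not: the equivalence proved here is about the return value only.

-- ===== PORT A =====
-- one iteration of A's inner loop body: compare li[j], li[j+1] and swap via temp.
-- getD is exact here: Pre_ guarantees 5 ≤ li.length, so every index A touches is in range.
def bstep (l : List Int) (j : Nat) : List Int :=
  if l.getD j 0 > l.getD (j + 1) 0 then
    (l.set j (l.getD (j + 1) 0)).set (j + 1) (l.getD j 0)   -- temp = li[j]; li[j] = li[j+1]; li[j+1] = temp
  else l

def middle_num (li : List Int) : Int :=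
  ((List.range 5).foldl (fun l i => (List.range (4 - i)).foldl (fun l j => bstep l j) l) li).getD 2 0

-- ===== PORT B =====
-- sorted(li[:5])[2]; getD is exact: inside Pre_ the sorted slice has length 5, so index 2 is in range.
def middle_num_alt (li : List Int) : Int :=
  (PySem.List.sorted (PySem.List.slice li none (some 5)) (fun x => x) false).getD 2 0

-- ===== PRECONDITION & SPEC =====
-- A raises IndexError iff li has fewer than 5 elements.
def Pre_middle_num (li : List Int) : Prop := 5 ≤ li.length
instance (li : List Int) : Decidable (Pre_middle_num li) := by unfold Pre_middle_num; infer_instance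

def pvWitness_middle_num : List Int := [5, 1, 4, 2, 3]

def Spec_middle_num (li : List Int) (out : Int) : Prop := out = middle_num_alt li
instance (li : List Int) (out : Int) : Decidable (Spec_middle_num li out) := by unfold Spec_middle_num; infer_instance

-- ===== CLAIM (what is proved, stated in full; the proofs are below) =====
def Claim_equal_middle_num : Prop := ∀ (li : List Int), Dom_middle_num li → Pre_middle_num li → Spec_middle_num li (middle_num li)

-- ===== LEMMAS AND PROOFS =====

-- one full bubble pass over the first k+1 positions, as structural recursion
def bpass : Nat → List Int → List Int
  | 0, l => l
  | k + 1, x :: y :: t => if x > y then y :: bpass k (x :: t) else x :: bpass k (y :: t)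
  | _ + 1, l => l

theorem bstep_cons (x : Int) (t : List Int) (j : Nat) :
    bstep (x :: t) (j + 1) = x :: bstep t j := by
  simp only [bstep, List.getD_cons_succ, List.set_cons_succ]
  split <;> rfl

theorem bstep_zero (x y : Int) (t : List Int) :
    bstep (x :: y :: t) 0 = if x > y then y :: x :: t else x :: y :: t := by
  simp [bstep]

theorem foldl_bstep_succ (ids : List Nat) : ∀ (x : Int) (t : List Int),
    (ids.map Nat.succ).foldl bstep (x :: t) = x :: ids.foldl bstep t := by
  induction ids with
  | nil => intro x t; rfl
  | cons i ids ih =>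
    intro x t
    simp only [List.map_cons, List.foldl_cons, Nat.succ_eq_add_one, bstep_cons]
    exact ih x (bstep t i)

theorem foldl_bstep_range : ∀ (k : Nat) (l : List Int), k < l.length →
    (List.range k).foldl bstep l = bpass k l := by
  intro k
  induction k with
  | zero => intro l _; rfl
  | succ k ih =>
    intro l hl
    rcases l with _ | ⟨x, _ | ⟨y, t⟩⟩
    · simp at hl
    · simp at hl
    · rw [List.range_succ_eq_map]
      simp only [List.foldl_cons, bstep_zero]
      by_cases h : x > y
      · rw [if_pos h, foldl_bstep_succ, ih (x :: t) (by simp at hl ⊢; omega)]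
        simp [bpass, h]
      · rw [if_neg h, foldl_bstep_succ, ih (y :: t) (by simp at hl ⊢; omega)]
        simp [bpass, h]

theorem bpass_perm : ∀ (k : Nat) (l : List Int), (bpass k l).Perm l := by
  intro k
  induction k with
  | zero => intro l; rfl
  | succ k ih =>
    intro l
    rcases l with _ | ⟨x, _ | ⟨y, t⟩⟩
    · rfl
    · rfl
    · by_cases h : x > y
      · simpa [bpass, h] using ((ih (x :: t)).cons y).trans (List.Perm.swap x y t)
      · simpa [bpass, h] using (ih (y :: t)).cons x

theorem bpass_append : ∀ (k : Nat) (l rest : List Int), k < l.length →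
    bpass k (l ++ rest) = bpass k l ++ rest := by
  intro k
  induction k with
  | zero => intro l rest _; rfl
  | succ k ih =>
    intro l rest hl
    rcases l with _ | ⟨x, _ | ⟨y, t⟩⟩
    · simp at hl
    · simp at hl
    · simp only [List.cons_append, bpass]
      by_cases h : x > y
      · rw [if_pos h, if_pos h, ← List.cons_append, ih (x :: t) rest (by simp at hl ⊢; omega)]
        rfl
      · rw [if_neg h, if_neg h, ← List.cons_append, ih (y :: t) rest (by simp at hl ⊢; omega)]
        rfl

-- a full pass on a list of length k+1 pushes a maximum to the last position
theorem bpass_max : ∀ (k : Nat) (l : List Int), l.length = k + 1 →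
    ∃ (l' : List Int) (m : Int), bpass k l = l' ++ [m] ∧ l'.length = k ∧ ∀ z ∈ l, z ≤ m := by
  intro k
  induction k with
  | zero =>
    intro l hl
    rcases l with _ | ⟨x, _ | ⟨y, t⟩⟩
    · simp at hl
    · exact ⟨[], x, rfl, rfl, by simp⟩
    · simp at hl
  | succ k ih =>
    intro l hl
    rcases l with _ | ⟨x, _ | ⟨y, t⟩⟩
    · simp at hl
    · simp at hl
    · by_cases h : x > y
      · obtain ⟨l', m, hp, hlen, hmax⟩ := ih (x :: t) (by simp at hl ⊢; omega)
        refine ⟨y :: l', m, by simp [bpass, h, hp], by simp [hlen], ?_⟩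
        intro z hz
        rw [List.mem_cons, List.mem_cons] at hz
        rcases hz with rfl | rfl | hz
        · exact hmax z (by simp)
        · exact le_of_lt (lt_of_lt_of_le h (hmax x (by simp)))
        · exact hmax z (by simp [hz])
      · obtain ⟨l', m, hp, hlen, hmax⟩ := ih (y :: t) (by simp at hl ⊢; omega)
        refine ⟨x :: l', m, by simp [bpass, h, hp], by simp [hlen], ?_⟩
        intro z hz
        rw [List.mem_cons, List.mem_cons] at hz
        rcases hz with rfl | rfl | hz
        · exact le_trans (le_of_not_gt h) (hmax y (by simp))
        · exact hmax z (by simp)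
        · exact hmax z (by simp [hz])

-- the composition of passes A performs: bpass 1 ∘ bpass 2 ∘ … ∘ bpass k (bpass k first)
def bubAux : Nat → List Int → List Int
  | 0, l => l
  | k + 1, l => bubAux k (bpass (k + 1) l)

theorem bubAux_sorted : ∀ (k : Nat) (l rest : List Int), l.length = k + 1 →
    bubAux k (l ++ rest) = PySem.List.sorted l (fun x => x) false ++ rest := by
  intro k
  induction k with
  | zero =>
    intro l rest hl
    rcases l with _ | ⟨x, _ | ⟨y, t⟩⟩
    · simp at hl
    · rw [PySem.List.sorted_eq_self_of_pairwise [x] (fun x => x) (by simp)]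
      rfl
    · simp at hl
  | succ k ih =>
    intro l rest hl
    obtain ⟨l', m, hp, hlen, hmax⟩ := bpass_max (k + 1) l hl
    have hperm : (PySem.List.sorted l' (fun x => x) false ++ [m]).Perm l := by
      refine ((PySem.List.sorted_perm l' (fun x => x) false).append_right [m]).trans ?_
      rw [← hp]; exact bpass_perm (k + 1) l
    have hsorted : PySem.List.sorted l (fun x => x) false
        = PySem.List.sorted l' (fun x => x) false ++ [m] := by
      refine PySem.List.sorted_id_eq_of_perm_of_pairwise l _ hperm ?_
      refine List.pairwise_append.mpr ⟨PySem.List.sorted_pairwise l' (fun x => x), by simp, ?_⟩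
      intro a ha b hb
      rw [List.mem_singleton] at hb; rw [hb]
      exact hmax a ((bpass_perm (k + 1) l).mem_iff.mp (hp ▸ List.mem_append_left [m]
        (((PySem.List.mem_sorted l' (fun x => x) false a)).mp ha)))
    calc bubAux (k + 1) (l ++ rest) = bubAux k (bpass (k + 1) (l ++ rest)) := rfl
      _ = bubAux k ((l' ++ [m]) ++ rest) := by
            rw [bpass_append (k + 1) l rest (by omega), hp]
      _ = bubAux k (l' ++ ([m] ++ rest)) := by rw [List.append_assoc]
      _ = PySem.List.sorted l' (fun x => x) false ++ ([m] ++ rest) := ih l' _ hlen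
      _ = PySem.List.sorted l (fun x => x) false ++ rest := by
            rw [hsorted, List.append_assoc]

theorem bpass_length (k : Nat) (l : List Int) : (bpass k l).length = l.length :=
  (bpass_perm k l).length_eq

theorem middle_num_eq_bubAux (li : List Int) (h : 5 ≤ li.length) :
    middle_num li = (bubAux 4 li).getD 2 0 := by
  unfold middle_num
  rw [show List.range 5 = [0, 1, 2, 3, 4] from by decide]
  simp only [List.foldl_cons, List.foldl_nil,
    show (4 : Nat) - 0 = 4 from rfl, show (4 : Nat) - 1 = 3 from rfl,
    show (4 : Nat) - 2 = 2 from rfl, show (4 : Nat) - 3 = 1 from rfl,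
    show (4 : Nat) - 4 = 0 from rfl, List.range_zero]
  rw [foldl_bstep_range 4 li (by omega),
    foldl_bstep_range 3 (bpass 4 li) (by rw [bpass_length]; omega),
    foldl_bstep_range 2 (bpass 3 (bpass 4 li)) (by rw [bpass_length, bpass_length]; omega),
    foldl_bstep_range 1 (bpass 2 (bpass 3 (bpass 4 li)))
      (by rw [bpass_length, bpass_length, bpass_length]; omega)]
  rfl

-- ===== VERDICT (by name: the statement is the Claim_ definition above) =====
theorem middle_num_spec : Claim_equal_middle_num := by
  intro li _ hpre
  unfold Spec_middle_num middle_num_alt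
  unfold Pre_middle_num at hpre
  have hslice : PySem.List.slice li none (some 5) = li.take 5 :=
    PySem.List.slice_to li (by norm_num)
  have hlen : (li.take 5).length = 5 := by simp; omega
  rw [middle_num_eq_bubAux li hpre]
  conv_lhs => rw [show li = li.take 5 ++ li.drop 5 from (List.take_append_drop 5 li).symm]
  rw [bubAux_sorted 4 (li.take 5) (li.drop 5) hlen, hslice]
  rw [List.getD_append _ _ _ _ (by rw [PySem.List.length_sorted, hlen]; omega)]
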